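-- pv_equiv track=rewrite | github.com/Frillion/FORR2HF05CU | Upprifjun.py | only_S
-- ===== SOURCE A (Python) =====
-- def only_S(strengur):
--     find_letter = 's'
--     for i in strengur:
--         if i == find_letter or i == find_letter.capitalize():
--             deadvalue = ''
--         else:
--             strengur = strengur.replace(i, '$')
--     return(strengur)
-- ===== SOURCE B (Python) =====
-- def only_S(strengur):
--     parts = []
--     run = 0
--     for c in strengur:
--         if c == 's' or c == 'S':
--             parts.append('$' * run)
--             parts.append(c)
--             run = 0
--         else:
--             run += 1
--     parts.append('$' * run)
--     return ''.join(parts)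
-- ===== Notes on version B (the rewrite author's own statement) =====
-- stated objective: faster
-- what changed: A repeatedly rewrites the whole string with str.replace (once per character of the original); B does a single run-length scan that emits '$'-runs between the kept 's'/'S' characters and joins the segments once.
import Mathlib
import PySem

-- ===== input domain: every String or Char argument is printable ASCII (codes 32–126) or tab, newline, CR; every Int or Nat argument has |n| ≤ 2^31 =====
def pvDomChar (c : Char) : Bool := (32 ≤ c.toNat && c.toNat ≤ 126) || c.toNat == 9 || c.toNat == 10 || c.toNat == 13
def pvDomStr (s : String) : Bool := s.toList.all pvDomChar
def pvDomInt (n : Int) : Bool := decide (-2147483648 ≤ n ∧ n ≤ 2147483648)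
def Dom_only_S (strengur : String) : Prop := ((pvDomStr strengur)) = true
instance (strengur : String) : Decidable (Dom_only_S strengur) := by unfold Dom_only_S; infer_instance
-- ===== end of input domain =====

-- B replaces A's repeated whole-string str.replace loop with a single run-length
-- scan that emits '$'-runs between kept 's'/'S' characters and joins the segments once.


-- ===== PORT A =====
-- for i in strengur iterates over the string as bound at loop entry; the
-- accumulator is the rebound strengur, rewritten by str.replace each time.
def only_S (strengur : String) : String :=
  strengur.toList.foldl
    (fun s i =>
      if i == 's' || i == 'S' then s
      else PySem.Str.replace s (String.ofList [i]) "$")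
    strengur

-- ===== PORT B =====
-- run-length scan: state (parts, run); '$' * run → replicate, ''.join → Str.join ""
def only_S_alt (strengur : String) : String :=
  let st := strengur.toList.foldl
    (fun (st : List String × Nat) c =>
      if c == 's' || c == 'S' then
        (st.1 ++ [String.ofList (List.replicate st.2 '$'), String.ofList [c]], 0)
      else (st.1, st.2 + 1))
    ([], 0)
  PySem.Str.join "" (st.1 ++ [String.ofList (List.replicate st.2 '$')])

-- ===== PRECONDITION & SPEC =====
def Spec_only_S (strengur : String) (out : String) : Prop := out = only_S_alt strengur
instance (strengur : String) (out : String) : Decidable (Spec_only_S strengur out) := by unfold Spec_only_S; infer_instance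

-- ===== CLAIM (what is proved, stated in full; the proofs are below) =====
def Claim_equal_only_S : Prop := ∀ (strengur : String), Dom_only_S strengur → Spec_only_S strengur (only_S strengur)

-- ===== LEMMAS AND PROOFS =====

-- A side: replacing a single-char pattern by a single char is a pointwise map
theorem replace_go_singleton (o n : Char) (l acc : List Char) (fuel : Nat)
    (h : l.length ≤ fuel) :
    PySem.Chars.replace.go [o] [n] fuel l acc
      = acc.reverse ++ l.map (fun c => if c = o then n else c) := by
  induction l generalizing fuel acc with
  | nil =>
    cases fuel <;> simp [PySem.Chars.replace.go]
  | cons c t ih =>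
    cases fuel with
    | zero => simp at h
    | succ fuel =>
      simp only [List.length_cons, Nat.succ_le_succ_iff] at h
      by_cases hc : c = o
      · subst hc
        have hpre : List.isPrefixOf [c] (c :: t) = true := by
          simp [List.isPrefixOf]
        simp only [PySem.Chars.replace.go, hpre, if_pos]
        rw [show List.drop [c].length (c :: t) = t from rfl, ih _ _ h]
        simp
      · have hpre : List.isPrefixOf [o] (c :: t) = false := by
          simp [List.isPrefixOf, Ne.symm hc]
        simp only [PySem.Chars.replace.go, hpre]
        rw [if_neg (by simp), ih _ _ h]
        simp [hc]

theorem replace_singleton (cs : List Char) (o n : Char) :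
    PySem.Chars.replace cs [o] [n] = cs.map (fun c => if c = o then n else c) := by
  unfold PySem.Chars.replace
  simp only [List.isEmpty_cons, if_false, Bool.false_eq_true]
  exact replace_go_singleton o n cs [] cs.length le_rfl

-- A's loop on lists of characters
def gstep (t : List Char) (i : Char) : List Char :=
  if i = 's' ∨ i = 'S' then t else t.map (fun c => if c = i then '$' else c)

def mask (l : List Char) (c : Char) : Char :=
  if c ∈ l ∧ ¬ (c = 's' ∨ c = 'S') then '$' else c

theorem foldl_gstep (l t : List Char) :
    List.foldl gstep t l = t.map (mask l) := by
  induction l generalizing t with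
  | nil =>
    simp only [List.foldl_nil]
    have hm : mask [] = id := by funext c; simp [mask]
    simp [hm]
  | cons i l ih =>
    simp only [List.foldl_cons]
    rw [ih]
    by_cases hi : i = 's' ∨ i = 'S'
    · simp only [gstep, if_pos hi]
      apply List.map_congr_left
      intro c _
      simp only [mask, List.mem_cons]
      by_cases hc : c = i
      · subst hc
        simp [hi]
      · simp [hc]
    · simp only [gstep, if_neg hi, List.map_map]
      apply List.map_congr_left
      intro c _
      simp only [Function.comp_apply]
      by_cases hc : c = i
      · rw [if_pos hc, hc]
        have h1 : mask l '$' = '$' := by unfold mask; split_ifs <;> rfl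
        have h2 : mask (i :: l) i = '$' := by
          unfold mask; rw [if_pos ⟨List.mem_cons_self, hi⟩]
        rw [h1, h2]
      · rw [if_neg hc]
        unfold mask
        by_cases hm : c ∈ l ∧ ¬ (c = 's' ∨ c = 'S')
        · rw [if_pos hm, if_pos ⟨List.mem_cons_of_mem _ hm.1, hm.2⟩]
        · rw [if_neg hm, if_neg]
          intro ⟨h1, h2⟩
          exact hm ⟨(List.mem_cons.mp h1).resolve_left hc, h2⟩

theorem only_S_toList (l : List Char) (s : String) :
    (List.foldl (fun s i =>
        if i == 's' || i == 'S' then s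
        else PySem.Str.replace s (String.ofList [i]) "$") s l).toList
      = List.foldl gstep s.toList l := by
  induction l generalizing s with
  | nil => rfl
  | cons i l ih =>
    simp only [List.foldl_cons]
    by_cases hi : i = 's' ∨ i = 'S'
    · rw [if_pos (by rcases hi with h | h <;> simp [h]), ih, gstep, if_pos hi]
    · push_neg at hi
      rw [if_neg (by simp [hi.1, hi.2]), ih]
      congr 1
      rw [PySem.Str.toList_replace, show ("$" : String).toList = ['$'] from rfl]
      simp only [String.toList_ofList]
      rw [replace_singleton]
      simp [gstep, hi.1, hi.2]

-- B side
def keepf (c : Char) : Char := if c = 's' ∨ c = 'S' then c else '$'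

theorem join_empty_sep (parts : List (List Char)) :
    PySem.Chars.join [] parts = parts.flatten := by
  induction parts with
  | nil => simp [PySem.Chars.join_nil]
  | cons p rest ih =>
    cases rest with
    | nil => simp [PySem.Chars.join_singleton]
    | cons q r => rw [PySem.Chars.join_cons_cons, ih]; simp

-- semantics of B's accumulated state: joined parts plus the pending run
def stJoin (st : List String × Nat) : List Char :=
  (st.1.map String.toList).flatten ++ List.replicate st.2 '$'

theorem bstep_invariant (l : List Char) (out : List String) (run : Nat) :
    stJoin (l.foldl
      (fun (st : List String × Nat) c =>
        if c == 's' || c == 'S' then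
          (st.1 ++ [String.ofList (List.replicate st.2 '$'), String.ofList [c]], 0)
        else (st.1, st.2 + 1))
      (out, run))
      = stJoin (out, run) ++ l.map keepf := by
  induction l generalizing out run with
  | nil => simp
  | cons c t ih =>
    simp only [List.foldl_cons]
    by_cases hc : c = 's' ∨ c = 'S'
    · rw [if_pos (by rcases hc with h | h <;> simp [h]), ih]
      simp [stJoin, keepf, hc]
    · push_neg at hc
      rw [if_neg (by simp [hc.1, hc.2]), ih]
      simp only [stJoin, List.map_cons, keepf, if_neg (not_or.mpr hc)]
      rw [List.replicate_succ']; simp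

theorem only_S_alt_toList (s : String) :
    (only_S_alt s).toList = s.toList.map keepf := by
  unfold only_S_alt
  rw [PySem.Str.toList_join, show ("" : String).toList = ([] : List Char) from rfl]
  simp only [List.map_append, List.map_cons, List.map_nil, String.toList_ofList]
  rw [join_empty_sep]
  have := bstep_invariant s.toList [] 0
  simpa [stJoin] using this

-- ===== VERDICT (by name: the statement is the Claim_ definition above) =====
theorem only_S_spec : Claim_equal_only_S := by
  intro strengur _
  unfold Spec_only_S only_S
  apply String.toList_injective
  rw [only_S_toList, foldl_gstep, only_S_alt_toList]
  apply List.map_congr_left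
  intro c hc
  simp only [mask, keepf]
  by_cases h : c = 's' ∨ c = 'S'
  · simp [h]
  · simp [hc, h]
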